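-- pv_equiv track=rewrite | github.com/anonymity21/LOBE | tosa_code/main_ratte.py | process_multi_results
-- ===== SOURCE A (Python) =====
-- def process_multi_results(raw_text):
--     results = []
--     current_block = []
--     for line in raw_text.splitlines():
--         if line.startswith('%') and '=' in line:
--             if current_block:
--                 results.append('\n'.join(current_block))
--                 current_block = []
--         current_block.append(line.strip())
--     if current_block:
--         results.append('\n'.join(current_block))
--
--     cleaned_blocks = []
--     for block in results:
--         lines = block.splitlines()
--         first_line = lines[0]
--         if 'Memref base@' in first_line and 'data =' in first_line:
--             prefix = first_line.split('=')[0].strip() + '='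
--             data_start = first_line.split('data =', 1)[1].strip()
--             cleaned = [prefix]
--             if data_start:
--                 cleaned.append(data_start)
--             cleaned.extend(lines[1:])
--             cleaned_blocks.append('\n'.join(cleaned))
--         else:
--             cleaned_blocks.append(block)
--     return cleaned_blocks
-- ===== SOURCE B (Python) =====
-- def process_multi_results(raw_text):
--     def finalize(block):
--         first = block[0]
--         if 'Memref base@' in first and 'data =' in first:
--             cleaned = [first.split('=')[0].strip() + '=']
--             data_start = first.split('data =', 1)[1].strip()
--             if data_start:
--                 cleaned.append(data_start)
--             cleaned.extend(block[1:])
--             return '\n'.join(cleaned)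
--         return '\n'.join(block)
--
--     out = []
--     block = []
--     for line in raw_text.splitlines():
--         if line.startswith('%') and '=' in line and block:
--             out.append(finalize(block))
--             block = []
--         block.append(line.strip())
--     if block:
--         out.append(finalize(block))
--     return out
-- ===== Notes on version B (the rewrite author's own statement) =====
-- stated objective: alternative
-- what changed: B fuses A's two sequential passes into one loop that cleans each block directly from its list of stripped lines as it is finalized, eliminating the intermediate results list and A's join-then-resplit round trip per block.
-- intended difference: On inputs where a memref data-header block's last line strips to empty, A's join-then-resplit silently drops that one trailing blank line from the cleaned block, while B keeps it exactly as A keeps trailing blank lines in non-memref blocks, so B's uniform behaviour is the intended one. — e.g. on process_multi_results("%x = Memref base@ data = 7\n "): A returns ["%x=\n7"], B returns ["%x=\n7\n"]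
import Mathlib
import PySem

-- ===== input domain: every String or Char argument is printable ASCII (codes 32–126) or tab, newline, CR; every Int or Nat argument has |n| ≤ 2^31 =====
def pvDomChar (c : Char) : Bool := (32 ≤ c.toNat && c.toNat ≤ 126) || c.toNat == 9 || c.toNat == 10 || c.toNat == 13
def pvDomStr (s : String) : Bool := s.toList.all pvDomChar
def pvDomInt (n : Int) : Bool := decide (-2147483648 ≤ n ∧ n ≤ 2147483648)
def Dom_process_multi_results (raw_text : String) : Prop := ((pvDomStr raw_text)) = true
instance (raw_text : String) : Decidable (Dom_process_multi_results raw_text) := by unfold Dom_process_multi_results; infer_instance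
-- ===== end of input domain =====

-- B fuses A's two passes into one loop that finalizes each block directly from its list of
-- stripped lines (no intermediate `results` list, no join-then-resplit round trip).

-- helper shared by both ports: the Python condition `line.startswith('%') and '=' in line`
def pvIsHeader (line : String) : Bool :=
  PySem.Str.startswith line "%" && PySem.Str.isIn "=" line

-- helper shared by both ports: the Python condition `'Memref base@' in s and 'data =' in s`
def pvIsMemref (s : String) : Bool :=
  PySem.Str.isIn "Memref base@" s && PySem.Str.isIn "data =" s

-- ===== PORT A =====
-- loop body of A's first pass (state = (results, current_block))
def pvStepA (st : List String × List String) (line : String) : List String × List String :=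
  let st := if pvIsHeader line then
      (if st.2 = [] then st else (st.1 ++ [PySem.Str.join "\n" st.2], ([] : List String)))
    else st
  (st.1, st.2 ++ [PySem.Str.strip line])

-- loop body of A's second pass, over the joined block string
def pvCleanA (block : String) : String :=
  let lines := PySem.Str.splitlines block
  -- lines[0]; the IndexError when `lines = []` is excluded by Pre_process_multi_results
  let first_line := PySem.List.pyGetD lines 0 ""
  if pvIsMemref first_line then
    let pre := PySem.Str.strip (PySem.List.pyGetD ((PySem.Str.split? first_line "=").getD []) 0 "") ++ "="
    let data_start := PySem.Str.strip (PySem.List.pyGetD ((PySem.Str.splitMax? first_line "data =" 1).getD []) 1 "")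
    PySem.Str.join "\n" ([pre] ++ (if data_start = "" then [] else [data_start]) ++ PySem.List.slice lines (some 1) none)
  else block

def process_multi_results (raw_text : String) : List String :=
  let st := (PySem.Str.splitlines raw_text).foldl pvStepA ([], [])
  let results := if st.2 = [] then st.1 else st.1 ++ [PySem.Str.join "\n" st.2]
  results.map pvCleanA

-- ===== PORT B =====
-- B's `finalize`: the memref cleaning applied directly to the list of stripped lines
def pvFinalizeB (block : List String) : String :=
  let first := PySem.List.pyGetD block 0 ""
  if pvIsMemref first then
    let pre := PySem.Str.strip (PySem.List.pyGetD ((PySem.Str.split? first "=").getD []) 0 "") ++ "="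
    let data_start := PySem.Str.strip (PySem.List.pyGetD ((PySem.Str.splitMax? first "data =" 1).getD []) 1 "")
    PySem.Str.join "\n" ([pre] ++ (if data_start = "" then [] else [data_start]) ++ PySem.List.slice block (some 1) none)
  else PySem.Str.join "\n" block

-- loop body of B's single fused pass (state = (out, block))
def pvStepB (st : List String × List String) (line : String) : List String × List String :=
  let st := if pvIsHeader line ∧ st.2 ≠ [] then (st.1 ++ [pvFinalizeB st.2], ([] : List String)) else st
  (st.1, st.2 ++ [PySem.Str.strip line])

def process_multi_results_alt (raw_text : String) : List String :=
  let st := (PySem.Str.splitlines raw_text).foldl pvStepB ([], [])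
  if st.2 = [] then st.1 else st.1 ++ [pvFinalizeB st.2]

-- ===== PRECONDITION & SPEC =====
-- the blocks of the line list: a new block starts at every header line; each block is its
-- stripped lines (used by Raises_/Pre_/D_ only, not by the ports)
def pvBlocksGo : List String → List String → List (List String)
  | cur, [] => [cur.reverse]
  | cur, l :: ls =>
      if pvIsHeader l then cur.reverse :: pvBlocksGo [PySem.Str.strip l] ls
      else pvBlocksGo (PySem.Str.strip l :: cur) ls

def pvBlocks : List String → List (List String)
  | [] => []
  | l :: ls => pvBlocksGo [PySem.Str.strip l] ls

-- Pre_ excludes exactly the inputs on which the Python A raises IndexError: those where some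
-- block is a single whitespace-only line (such a block joins to the empty string, whose
-- splitlines() is empty, so indexing its first line raises). B returns the empty string there.
def Pre_process_multi_results (raw_text : String) : Prop :=
  ¬ ([""] ∈ pvBlocks (PySem.Str.splitlines raw_text))
instance (raw_text : String) : Decidable (Pre_process_multi_results raw_text) := by
  unfold Pre_process_multi_results; infer_instance

def pvWitness_process_multi_results : String := "%x = Memref base@ data = 7\nrest"

-- On inputs where a memref data-header block's last line strips to empty, A's join-then-resplit
-- silently drops that one trailing blank line from the cleaned block, while B keeps it exactly
-- as A keeps trailing blank lines in non-memref blocks, so B's uniform behaviour is intended.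
def D_process_multi_results (raw_text : String) : Prop :=
  ∃ b ∈ pvBlocks (PySem.Str.splitlines raw_text),
    pvIsMemref (PySem.List.pyGetD b 0 "") = true ∧ b.getLast? = some ""
instance (raw_text : String) : Decidable (D_process_multi_results raw_text) := by
  unfold D_process_multi_results; infer_instance

def Spec_process_multi_results (raw_text : String) (out : List String) : Prop :=
  ¬ D_process_multi_results raw_text → out = process_multi_results_alt raw_text
instance (raw_text : String) (out : List String) : Decidable (Spec_process_multi_results raw_text out) := by
  unfold Spec_process_multi_results; infer_instance

def pvDiffWitness_process_multi_results : String := "%x = Memref base@ data = 7\n "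
def pvDiffWitnessOut_process_multi_results : (List String) × (List String) :=
  (["%x=\n7"], ["%x=\n7\n"])

-- ===== CLAIM (what is proved, stated in full; the proofs are below) =====
def Claim_unchanged_process_multi_results : Prop := ∀ (raw_text : String), Dom_process_multi_results raw_text → Pre_process_multi_results raw_text → Spec_process_multi_results raw_text (process_multi_results raw_text)
def Claim_changed_process_multi_results : Prop := Dom_process_multi_results (pvDiffWitness_process_multi_results) ∧ Pre_process_multi_results (pvDiffWitness_process_multi_results) ∧ D_process_multi_results (pvDiffWitness_process_multi_results) ∧ process_multi_results (pvDiffWitness_process_multi_results) = pvDiffWitnessOut_process_multi_results.1 ∧ process_multi_results_alt (pvDiffWitness_process_multi_results) = pvDiffWitnessOut_process_multi_results.2 ∧ pvDiffWitnessOut_process_multi_results.1 ≠ pvDiffWitnessOut_process_multi_results.2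
def Claim_exact_process_multi_results : Prop := ∀ (raw_text : String), Dom_process_multi_results raw_text → Pre_process_multi_results raw_text → D_process_multi_results raw_text → process_multi_results raw_text ≠ process_multi_results_alt raw_text

-- ===== LEMMAS AND PROOFS =====

-- the break-character test splitlines splits on (the local isB inside PySem.Chars.splitlines)
def pvIsBreak (c : Char) : Bool :=
  let n := c.toNat
  decide (n = 10) || decide (n = 13) || decide (n = 11) || decide (n = 12) || decide (n = 28) || decide (n = 29) ||
          decide (n = 30) ||
        decide (n = 133) ||
      decide (n = 8232) ||
    decide (n = 8233)

lemma pv_splitlines_eq_go (s : List Char) :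
    PySem.Chars.splitlines s = PySem.Chars.splitlines.go pvIsBreak s [] [] := rfl

lemma pv_go_newline (rest cur : List Char) (acc : List (List Char)) :
    PySem.Chars.splitlines.go pvIsBreak ('\n' :: rest) cur acc
      = PySem.Chars.splitlines.go pvIsBreak rest [] (cur.reverse :: acc) := rfl

lemma pv_go_cons_nonbreak {c : Char} (hc : pvIsBreak c = false) (rest cur : List Char)
    (acc : List (List Char)) :
    PySem.Chars.splitlines.go pvIsBreak (c :: rest) cur acc
      = PySem.Chars.splitlines.go pvIsBreak rest (c :: cur) acc := by
  rw [PySem.Chars.splitlines.go.eq_3 pvIsBreak cur acc c rest]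
  · simp [hc]
  · intro r h1 _h2
    subst h1
    exact absurd hc (by decide)

lemma pv_go_span (p : List Char) (h : ∀ c ∈ p, pvIsBreak c = false) (rest cur : List Char)
    (acc : List (List Char)) :
    PySem.Chars.splitlines.go pvIsBreak (p ++ '\n' :: rest) cur acc
      = PySem.Chars.splitlines.go pvIsBreak rest [] ((cur.reverse ++ p) :: acc) := by
  induction p generalizing cur with
  | nil => simpa using pv_go_newline rest cur acc
  | cons c p ih =>
      rw [List.cons_append, pv_go_cons_nonbreak (h c (by simp)),
        ih (fun x hx => h x (by simp [hx]))]
      simp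

lemma pv_go_last (p : List Char) (h : ∀ c ∈ p, pvIsBreak c = false) (cur : List Char)
    (acc : List (List Char)) :
    PySem.Chars.splitlines.go pvIsBreak p cur acc
      = if cur.reverse ++ p = [] then acc.reverse else acc.reverse ++ [cur.reverse ++ p] := by
  induction p generalizing cur with
  | nil =>
      rw [PySem.Chars.splitlines.go.eq_1]
      cases cur <;> simp
  | cons c p ih =>
      rw [pv_go_cons_nonbreak (h c (by simp)), ih (fun x hx => h x (by simp [hx]))]
      simp

lemma pv_go_join (ps : List (List Char)) (hne : ps ≠ [])
    (hnb : ∀ p ∈ ps, ∀ c ∈ p, pvIsBreak c = false) :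
    ∀ acc, PySem.Chars.splitlines.go pvIsBreak (PySem.Chars.join ['\n'] ps) [] acc
      = acc.reverse ++ (if ps.getLast? = some [] then ps.dropLast else ps) := by
  induction ps with
  | nil => exact absurd rfl hne
  | cons p ps ih =>
      intro acc
      cases ps with
      | nil =>
          rw [PySem.Chars.join_singleton, pv_go_last p (hnb p (by simp)) [] acc]
          by_cases hp : p = []
          · subst hp; simp
          · simp [hp]
      | cons q ps' =>
          have hj : PySem.Chars.join ['\n'] (p :: q :: ps') = p ++ '\n' :: PySem.Chars.join ['\n'] (q :: ps') := by
            rw [PySem.Chars.join_cons_cons]; simp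
          rw [hj, pv_go_span p (hnb p (by simp))]
          rw [ih (by simp) (fun x hx c hc => hnb x (by simp [hx]) c hc) _]
          simp only [List.getLast?_cons_cons, List.dropLast_cons_of_ne_nil (List.cons_ne_nil q ps'),
            List.reverse_cons, List.append_assoc, List.singleton_append]
          split <;> rfl

lemma pv_splitlines_join_chars (ps : List (List Char)) (hne : ps ≠ [])
    (hnb : ∀ p ∈ ps, ∀ c ∈ p, pvIsBreak c = false) :
    PySem.Chars.splitlines (PySem.Chars.join ['\n'] ps)
      = if ps.getLast? = some [] then ps.dropLast else ps := by
  rw [pv_splitlines_eq_go, pv_go_join ps hne hnb []]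
  simp

lemma pv_go_nobreak : ∀ (s cur : List Char) (acc : List (List Char)),
    (∀ c ∈ cur, pvIsBreak c = false) → (∀ p ∈ acc, ∀ c ∈ p, pvIsBreak c = false) →
    ∀ p ∈ PySem.Chars.splitlines.go pvIsBreak s cur acc, ∀ c ∈ p, pvIsBreak c = false := by
  refine PySem.Chars.splitlines.go.induct pvIsBreak
    (fun s cur acc => (∀ c ∈ cur, pvIsBreak c = false) → (∀ p ∈ acc, ∀ c ∈ p, pvIsBreak c = false) →
      ∀ p ∈ PySem.Chars.splitlines.go pvIsBreak s cur acc, ∀ c ∈ p, pvIsBreak c = false)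
    ?_ ?_ ?_ ?_ ?_
  · intro cur acc hemp hcur hacc p hp
    rw [PySem.Chars.splitlines.go.eq_1, if_pos hemp] at hp
    exact hacc p (List.mem_reverse.mp hp)
  · intro cur acc hc hcur hacc p hp
    rw [PySem.Chars.splitlines.go.eq_1] at hp
    rw [if_neg hc] at hp
    simp only [List.reverse_cons, List.mem_append, List.mem_reverse, List.mem_singleton] at hp
    rcases hp with hp | hp
    · exact hacc p hp
    · subst hp; intro c hc'; exact hcur c (List.mem_reverse.mp hc')
  · intro rest cur acc ih hcur hacc p hp
    rw [show PySem.Chars.splitlines.go pvIsBreak ('\x0d' :: '\n' :: rest) cur acc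
          = PySem.Chars.splitlines.go pvIsBreak rest [] (cur.reverse :: acc) from rfl] at hp
    refine ih (by simp) ?_ p hp
    intro q hq
    rcases List.mem_cons.mp hq with hq | hq
    · subst hq; intro c hc'; exact hcur c (List.mem_reverse.mp hc')
    · exact hacc q hq
  · intro c rest cur acc hside hbrk ih hcur hacc p hp
    rw [PySem.Chars.splitlines.go.eq_3 pvIsBreak cur acc c rest
        (fun r h1 h2 => hside r h1 h2), if_pos hbrk] at hp
    refine ih (by simp) ?_ p hp
    intro q hq
    rcases List.mem_cons.mp hq with hq | hq
    · subst hq; intro c' hc'; exact hcur c' (List.mem_reverse.mp hc')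
    · exact hacc q hq
  · intro c rest cur acc hside hbrk ih hcur hacc p hp
    rw [PySem.Chars.splitlines.go.eq_3 pvIsBreak cur acc c rest
        (fun r h1 h2 => hside r h1 h2), if_neg hbrk] at hp
    refine ih ?_ hacc p hp
    intro x hx
    rcases List.mem_cons.mp hx with hx | hx
    · subst hx; exact Bool.eq_false_iff.mpr hbrk
    · exact hcur x hx

lemma pv_splitlines_nobreak (s : List Char) :
    ∀ p ∈ PySem.Chars.splitlines s, ∀ c ∈ p, pvIsBreak c = false := by
  rw [pv_splitlines_eq_go]
  exact pv_go_nobreak s [] [] (by simp) (by simp)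

lemma pv_splitlines_nobreakS (s : String) :
    ∀ p ∈ PySem.Str.splitlines s, ∀ c ∈ p.toList, pvIsBreak c = false := by
  intro p hp
  simp only [PySem.Str.splitlines, List.mem_map] at hp
  obtain ⟨q, hq, rfl⟩ := hp
  rw [String.toList_ofList]
  exact pv_splitlines_nobreak s.toList q hq

lemma pv_strip_nobreak (s : String) (h : ∀ c ∈ s.toList, pvIsBreak c = false) :
    ∀ c ∈ (PySem.Str.strip s).toList, pvIsBreak c = false := by
  intro c hc
  rw [PySem.Str.toList_strip] at hc
  unfold PySem.Chars.strip PySem.Chars.rstrip PySem.Chars.lstrip at hc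
  rw [List.mem_reverse] at hc
  have h1 := (List.dropWhile_sublist (l := (List.dropWhile PySem.Chars.isspace s.toList).reverse)
    PySem.Chars.isspace).subset hc
  rw [List.mem_reverse] at h1
  exact h c ((List.dropWhile_sublist _).subset h1)

lemma pv_splitlines_joinS (b : List String) (hne : b ≠ [])
    (hnb : ∀ p ∈ b, ∀ c ∈ p.toList, pvIsBreak c = false) :
    PySem.Str.splitlines (PySem.Str.join "\n" b)
      = if b.getLast? = some "" then b.dropLast else b := by
  have h1 : PySem.Str.splitlines (PySem.Str.join "\n" b)
      = (PySem.Chars.splitlines ((PySem.Str.join "\n" b).toList)).map String.ofList := rfl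
  have hlist : (PySem.Str.join "\n" b).toList = PySem.Chars.join ['\n'] (b.map String.toList) := by
    rw [PySem.Str.toList_join]
    rfl
  rw [h1, hlist, pv_splitlines_join_chars (b.map String.toList) (by simpa using hne) ?nb]
  case nb =>
    intro p hp
    rw [List.mem_map] at hp
    obtain ⟨x, hx, rfl⟩ := hp
    exact hnb x hx
  rw [List.getLast?_map]
  have hmap : ∀ l : List String, (l.map String.toList).map String.ofList = l := by
    intro l
    rw [List.map_map]
    simp [Function.comp_def, String.ofList_toList]
  by_cases hl : b.getLast? = some ""
  · rw [hl, if_pos (show Option.map String.toList (some "") = some [] from rfl),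
      if_pos rfl, ← List.map_dropLast, hmap]
  · rw [if_neg ?hc, if_neg hl, hmap]
    case hc =>
      cases hb : b.getLast? with
      | none => simp
      | some x =>
          simp only [Option.map_some, Option.some.injEq, String.toList_eq_nil_iff]
          intro hx
          exact hl (by rw [hb, hx])

lemma pv_head_eq (b : List String) (hne : b ≠ [])
    (hnb : ∀ p ∈ b, ∀ c ∈ p.toList, pvIsBreak c = false) :
    PySem.List.pyGetD (PySem.Str.splitlines (PySem.Str.join "\n" b)) 0 ""
      = PySem.List.pyGetD b 0 "" := by
  rw [pv_splitlines_joinS b hne hnb]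
  by_cases hl : b.getLast? = some ""
  · rw [if_pos hl]
    match b, hne with
    | [x], _ =>
        have hx : x = "" := by simpa using hl
        subst hx
        simp [PySem.List.pyGetD_zero]
    | x :: y :: t, _ =>
        simp [PySem.List.pyGetD_zero]
  · rw [if_neg hl]

lemma pv_clean_eq_finalize (b : List String) (hne : b ≠ [])
    (hnb : ∀ p ∈ b, ∀ c ∈ p.toList, pvIsBreak c = false)
    (hD : ¬(pvIsMemref (PySem.List.pyGetD b 0 "") = true ∧ b.getLast? = some "")) :
    pvCleanA (PySem.Str.join "\n" b) = pvFinalizeB b := by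
  by_cases hm : pvIsMemref (PySem.List.pyGetD b 0 "") = true
  · have hlast : ¬ b.getLast? = some "" := fun h => hD ⟨hm, h⟩
    have hsl : PySem.Str.splitlines (PySem.Str.join "\n" b) = b := by
      rw [pv_splitlines_joinS b hne hnb, if_neg hlast]
    simp only [pvCleanA, pvFinalizeB, hsl]
  · have hhead := pv_head_eq b hne hnb
    simp only [pvCleanA, pvFinalizeB, hhead, hm, Bool.false_eq_true, if_false]

-- the blocks accumulator characterizes A's first pass (cur is the reversed current block)
lemma pv_foldA (ls : List String) : ∀ (res cur : List String), cur ≠ [] →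
    (let st := ls.foldl pvStepA (res, cur);
     if st.2 = [] then st.1 else st.1 ++ [PySem.Str.join "\n" st.2])
    = res ++ (pvBlocksGo cur.reverse ls).map (PySem.Str.join "\n") := by
  induction ls with
  | nil =>
      intro res cur hcur
      simp [pvBlocksGo, hcur]
  | cons l ls ih =>
      intro res cur hcur
      by_cases h : pvIsHeader l
      · have hstep : pvStepA (res, cur) l
            = (res ++ [PySem.Str.join "\n" cur], [PySem.Str.strip l]) := by
          simp [pvStepA, h, hcur]
        simp only [List.foldl_cons, hstep]
        rw [ih (res ++ [PySem.Str.join "\n" cur]) [PySem.Str.strip l] (by simp)]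
        simp [pvBlocksGo, h]
      · have hstep : pvStepA (res, cur) l = (res, cur ++ [PySem.Str.strip l]) := by
          simp [pvStepA, h]
        simp only [List.foldl_cons, hstep]
        rw [ih res (cur ++ [PySem.Str.strip l]) (by simp)]
        simp [pvBlocksGo, h]

lemma pv_foldB (ls : List String) : ∀ (res cur : List String), cur ≠ [] →
    (let st := ls.foldl pvStepB (res, cur);
     if st.2 = [] then st.1 else st.1 ++ [pvFinalizeB st.2])
    = res ++ (pvBlocksGo cur.reverse ls).map pvFinalizeB := by
  induction ls with
  | nil =>
      intro res cur hcur
      simp [pvBlocksGo, hcur]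
  | cons l ls ih =>
      intro res cur hcur
      by_cases h : pvIsHeader l
      · have hstep : pvStepB (res, cur) l
            = (res ++ [pvFinalizeB cur], [PySem.Str.strip l]) := by
          simp [pvStepB, h, hcur]
        simp only [List.foldl_cons, hstep]
        rw [ih (res ++ [pvFinalizeB cur]) [PySem.Str.strip l] (by simp)]
        simp [pvBlocksGo, h]
      · have hstep : pvStepB (res, cur) l = (res, cur ++ [PySem.Str.strip l]) := by
          simp [pvStepB, h]
        simp only [List.foldl_cons, hstep]
        rw [ih res (cur ++ [PySem.Str.strip l]) (by simp)]
        simp [pvBlocksGo, h]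

lemma pv_first_step (st0 : List String × List String) (l : String) (h : st0 = ([], [])) :
    pvStepA st0 l = ([], [PySem.Str.strip l]) ∧ pvStepB st0 l = ([], [PySem.Str.strip l]) := by
  subst h
  constructor <;> simp [pvStepA, pvStepB]

lemma pv_A_eq (raw_text : String) :
    process_multi_results raw_text
      = ((pvBlocks (PySem.Str.splitlines raw_text)).map (PySem.Str.join "\n")).map pvCleanA := by
  unfold process_multi_results
  cases hls : PySem.Str.splitlines raw_text with
  | nil => simp [pvBlocks]
  | cons l ls =>
      simp only [List.foldl_cons, (pv_first_step ([], []) l rfl).1]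
      rw [pv_foldA ls [] [PySem.Str.strip l] (by simp)]
      simp [pvBlocks]

lemma pv_B_eq (raw_text : String) :
    process_multi_results_alt raw_text
      = (pvBlocks (PySem.Str.splitlines raw_text)).map pvFinalizeB := by
  unfold process_multi_results_alt
  cases hls : PySem.Str.splitlines raw_text with
  | nil => simp [pvBlocks]
  | cons l ls =>
      simp only [List.foldl_cons, (pv_first_step ([], []) l rfl).2]
      rw [pv_foldB ls [] [PySem.Str.strip l] (by simp)]
      simp [pvBlocks]

lemma pv_blocksGo_ne_nil (ls : List String) : ∀ (cur : List String), cur ≠ [] →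
    ∀ b ∈ pvBlocksGo cur ls, b ≠ [] := by
  induction ls with
  | nil =>
      intro cur hcur b hb
      simp only [pvBlocksGo, List.mem_singleton] at hb
      subst hb
      simpa using hcur
  | cons l ls ih =>
      intro cur hcur b hb
      by_cases h : pvIsHeader l
      · simp only [pvBlocksGo, if_pos h, List.mem_cons] at hb
        rcases hb with hb | hb
        · subst hb; simpa using hcur
        · exact ih [PySem.Str.strip l] (by simp) b hb
      · simp only [pvBlocksGo, if_neg h] at hb
        exact ih (PySem.Str.strip l :: cur) (by simp) b hb

lemma pv_blocksGo_nobreak (ls : List String) : ∀ (cur : List String),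
    (∀ p ∈ cur, ∀ c ∈ p.toList, pvIsBreak c = false) →
    (∀ l ∈ ls, ∀ c ∈ l.toList, pvIsBreak c = false) →
    ∀ b ∈ pvBlocksGo cur ls, ∀ p ∈ b, ∀ c ∈ p.toList, pvIsBreak c = false := by
  induction ls with
  | nil =>
      intro cur hcur _ b hb p hp
      simp only [pvBlocksGo, List.mem_singleton] at hb
      subst hb
      exact hcur p (List.mem_reverse.mp hp)
  | cons l ls ih =>
      intro cur hcur hls b hb p hp
      have hstrip : ∀ c ∈ (PySem.Str.strip l).toList, pvIsBreak c = false :=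
        pv_strip_nobreak l (hls l (by simp))
      have hls' : ∀ x ∈ ls, ∀ c ∈ x.toList, pvIsBreak c = false :=
        fun x hx => hls x (by simp [hx])
      by_cases h : pvIsHeader l
      · simp only [pvBlocksGo, if_pos h, List.mem_cons] at hb
        rcases hb with hb | hb
        · subst hb; exact hcur p (List.mem_reverse.mp hp)
        · exact ih [PySem.Str.strip l] (by simpa using hstrip) hls' b hb p hp
      · simp only [pvBlocksGo, if_neg h] at hb
        refine ih (PySem.Str.strip l :: cur) ?_ hls' b hb p hp
        intro x hx
        rcases List.mem_cons.mp hx with hx | hx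
        · subst hx; exact hstrip
        · exact hcur x hx

lemma pv_blocks_ne_nil (ls : List String) : ∀ b ∈ pvBlocks ls, b ≠ [] := by
  cases ls with
  | nil => simp [pvBlocks]
  | cons l ls => exact pv_blocksGo_ne_nil ls [PySem.Str.strip l] (by simp)

lemma pv_blocks_nobreak (s : String) :
    ∀ b ∈ pvBlocks (PySem.Str.splitlines s), ∀ p ∈ b, ∀ c ∈ p.toList, pvIsBreak c = false := by
  have hls := pv_splitlines_nobreakS s
  cases hs : PySem.Str.splitlines s with
  | nil => simp [pvBlocks]
  | cons l ls =>
      rw [hs] at hls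
      refine pv_blocksGo_nobreak ls [PySem.Str.strip l] ?_ (fun x hx => hls x (by simp [hx]))
      intro p hp
      rcases List.mem_cons.mp hp with hp | hp
      · subst hp; exact pv_strip_nobreak l (hls l (by simp))
      · simp at hp

lemma pv_map_clean (bs : List (List String))
    (h : ∀ b ∈ bs, pvCleanA (PySem.Str.join "\n" b) = pvFinalizeB b) :
    (bs.map (PySem.Str.join "\n")).map pvCleanA = bs.map pvFinalizeB := by
  induction bs with
  | nil => rfl
  | cons b bs ih =>
      simp only [List.map_cons]
      rw [h b (by simp), ih (fun x hx => h x (by simp [hx]))]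

lemma pv_join_append_nil (ps : List (List Char)) (hne : ps ≠ []) :
    PySem.Chars.join ['\n'] (ps ++ [[]]) = PySem.Chars.join ['\n'] ps ++ ['\n'] := by
  induction ps with
  | nil => exact absurd rfl hne
  | cons p ps ih =>
      cases ps with
      | nil =>
          show PySem.Chars.join ['\n'] [p, []] = PySem.Chars.join ['\n'] [p] ++ ['\n']
          rw [PySem.Chars.join_cons_cons, PySem.Chars.join_singleton, PySem.Chars.join_singleton]
          simp
      | cons q ps' =>
          show PySem.Chars.join ['\n'] (p :: ((q :: ps') ++ [[]]))
              = PySem.Chars.join ['\n'] (p :: q :: ps') ++ ['\n']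
          have h1 : (q :: ps') ++ [[]] = q :: (ps' ++ [[]]) := rfl
          rw [h1, PySem.Chars.join_cons_cons, ← h1, ih (by simp), PySem.Chars.join_cons_cons]
          simp

lemma pv_joinS_ne (L M : List String) (hL : L ≠ []) (hM : M = L ++ [""]) :
    PySem.Str.join "\n" L ≠ PySem.Str.join "\n" M := by
  intro h
  subst hM
  have h' := congrArg String.toList h
  rw [PySem.Str.toList_join, PySem.Str.toList_join,
    show ("\n" : String).toList = ['\n'] from rfl, List.map_append,
    show (([""] : List String).map String.toList) = [[]] from rfl,
    pv_join_append_nil (L.map String.toList) (by simpa using hL)] at h'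
  have hlen := congrArg List.length h'
  simp at hlen

lemma pv_map_clean_inj (bs : List (List String))
    (h : (bs.map (PySem.Str.join "\n")).map pvCleanA = bs.map pvFinalizeB) :
    ∀ b ∈ bs, pvCleanA (PySem.Str.join "\n" b) = pvFinalizeB b := by
  induction bs with
  | nil => intro b hb; simp at hb
  | cons x bs ih =>
      simp only [List.map_cons, List.cons.injEq] at h
      intro b hb
      rcases List.mem_cons.mp hb with hb | hb
      · subst hb; exact h.1
      · exact ih h.2 b hb

lemma pv_clean_ne_finalize (b : List String) (hne : b ≠ [])
    (hnb : ∀ p ∈ b, ∀ c ∈ p.toList, pvIsBreak c = false)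
    (hm : pvIsMemref (PySem.List.pyGetD b 0 "") = true) (hl : b.getLast? = some "") :
    pvCleanA (PySem.Str.join "\n" b) ≠ pvFinalizeB b := by
  have hhead := pv_head_eq b hne hnb
  have hsl : PySem.Str.splitlines (PySem.Str.join "\n" b) = b.dropLast := by
    rw [pv_splitlines_joinS b hne hnb, if_pos hl]
  obtain ⟨t', rfl⟩ := List.getLast?_eq_some_iff.mp hl
  cases t' with
  | nil => exact absurd hm (by decide)
  | cons x r =>
      rw [List.dropLast_concat] at hsl
      rw [hsl] at hhead
      simp only [pvCleanA, pvFinalizeB]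
      rw [hsl, hhead, if_pos hm, if_pos hm,
        PySem.List.slice_from_one, PySem.List.slice_from_one, List.cons_append]
      simp only [List.tail_cons]
      exact pv_joinS_ne _ _ (by simp) (by simp)

-- ===== VERDICT (by name: the statement is the Claim_ definition above) =====
theorem process_multi_results_spec : Claim_unchanged_process_multi_results := by
  intro raw_text _hDom _hPre hnD
  rw [pv_A_eq, pv_B_eq]
  apply pv_map_clean
  intro b hb
  refine pv_clean_eq_finalize b (pv_blocks_ne_nil _ b hb) (pv_blocks_nobreak raw_text b hb) ?_
  rintro ⟨hm, hl⟩
  exact hnD ⟨b, hb, hm, hl⟩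

set_option maxHeartbeats 2000000 in
theorem process_multi_results_changed : Claim_changed_process_multi_results := by
  unfold Claim_changed_process_multi_results; decide

theorem process_multi_results_tight : Claim_exact_process_multi_results := by
  intro raw_text _hDom _hPre hD hAB
  unfold D_process_multi_results at hD
  obtain ⟨b, hb, hm, hl⟩ := hD
  rw [pv_A_eq, pv_B_eq] at hAB
  exact pv_clean_ne_finalize b (pv_blocks_ne_nil _ b hb) (pv_blocks_nobreak raw_text b hb) hm hl
    (pv_map_clean_inj _ hAB b hb)
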